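-- pv_equiv track=rewrite | github.com/SteveWillowby/Isomorphism_Experiments | previous_methods/matrix_method.py | find_out_if_matrices_are_isomorphic
-- ===== SOURCE A (Python) =====
-- def swap_rows(M, i, j):
--     temp_row = M[i]
--     M[i] = M[j]
--     M[j] = temp_row
--
-- def swap_cols(M, i, j):
--     for row in range(0, len(M)):
--         temp_val = M[row][i]
--         M[row][i] = M[row][j]
--         M[row][j] = temp_val
--
-- def get_copy_of_col(M, c):
--     return [M[r][c] for r in range(0, len(M))]
--
-- def find_swap_lists(M, k):
--     n = len(M)
--     if k == 0:
--         return [[i for i in range(0,n)]]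
--     main_dict = {}
--     main_lists = []
--     for row in range(0,n):
--         curr_dict = main_dict
--         for col in range(0, k):
--             value = M[row][col]
--             if value in curr_dict:
--                 if col == k-1:
--                     curr_dict[value].append(row)
--                 else:
--                     curr_dict = curr_dict[value]
--             else:
--                 if col == k-1:
--                     curr_dict[value] = [row]
--                     main_lists.append(curr_dict[value])
--                 else:
--                     curr_dict[value] = {}
--                     curr_dict = curr_dict[value]
--     return main_lists
--
-- def is_col_viable(M, swap_lists, target_col, actual_col_idx):
--     source_col = get_copy_of_col(M, actual_col_idx)
--     for sl in swap_lists: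
--         wrong_counts = [0,0]
--         for row in range(0, len(sl)):
--             if target_col[row] != source_col[row]:
--                 wrong_counts[source_col[row]] += 1
--         if wrong_counts[0] != wrong_counts[1]:
--             return False
--     return True
--
-- def update_M_with_viable_column(M, swap_lists, target_col, target_col_idx, actual_col_idx):
--     swap_cols(M, target_col_idx, actual_col_idx)
--     source_col = get_copy_of_col(M, target_col_idx)
--     for sl in swap_lists:
--         wrong_locs = [[],[]]
--         for row in range(0, len(sl)):
--             if target_col[row] != source_col[row]:
--                 wrong_locs[source_col[row]].append(row)
--         for wrong_idx in range(0, len(wrong_locs[0])):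
--             swap_rows(M, wrong_locs[0][wrong_idx], wrong_locs[1][wrong_idx])
--
-- def find_out_if_matrices_are_isomorphic(M1, M2):
--     n = len(M1)
--     for target_col_idx in range(0, n):
--         swap_lists = find_swap_lists(M2, target_col_idx)
--         target_col = get_copy_of_col(M1, target_col_idx)
--         success = False
--         for actual_col_idx in range(target_col_idx, n):
--             if is_col_viable(M2, swap_lists, target_col, actual_col_idx):
--                 update_M_with_viable_column(M2, swap_lists, target_col, target_col_idx, actual_col_idx)
--                 success = True
--                 break
--         if not success:
--             return False
--     return True
-- ===== SOURCE B (Python) =====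
-- # B: identical greedy column-matching, but find_swap_lists groups rows with one flat
-- # dict keyed by the row's k-prefix tuple (setdefault/append) instead of a nested-dict trie.
-- # Note: like A, this function mutates M2 in place (column and row swaps); the equivalence
-- # claimed is about the return value.
--
-- def swap_rows(M, i, j):
--     temp_row = M[i]
--     M[i] = M[j]
--     M[j] = temp_row
--
-- def swap_cols(M, i, j):
--     for row in range(0, len(M)):
--         temp_val = M[row][i]
--         M[row][i] = M[row][j]
--         M[row][j] = temp_val
--
-- def get_copy_of_col(M, c):
--     return [M[r][c] for r in range(0, len(M))]
--
-- def find_swap_lists(M, k):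
--     n = len(M)
--     if k == 0:
--         return [[i for i in range(0, n)]]
--     groups = {}
--     for row in range(0, n):
--         key = tuple(M[row][col] for col in range(0, k))
--         groups.setdefault(key, []).append(row)
--     return list(groups.values())
--
-- def is_col_viable(M, swap_lists, target_col, actual_col_idx):
--     source_col = get_copy_of_col(M, actual_col_idx)
--     for sl in swap_lists:
--         wrong_counts = [0,0]
--         for row in range(0, len(sl)):
--             if target_col[row] != source_col[row]:
--                 wrong_counts[source_col[row]] += 1
--         if wrong_counts[0] != wrong_counts[1]:
--             return False
--     return True
--
-- def update_M_with_viable_column(M, swap_lists, target_col, target_col_idx, actual_col_idx):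
--     swap_cols(M, target_col_idx, actual_col_idx)
--     source_col = get_copy_of_col(M, target_col_idx)
--     for sl in swap_lists:
--         wrong_locs = [[],[]]
--         for row in range(0, len(sl)):
--             if target_col[row] != source_col[row]:
--                 wrong_locs[source_col[row]].append(row)
--         for wrong_idx in range(0, len(wrong_locs[0])):
--             swap_rows(M, wrong_locs[0][wrong_idx], wrong_locs[1][wrong_idx])
--
-- def find_out_if_matrices_are_isomorphic(M1, M2):
--     n = len(M1)
--     for target_col_idx in range(0, n):
--         swap_lists = find_swap_lists(M2, target_col_idx)
--         target_col = get_copy_of_col(M1, target_col_idx)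
--         success = False
--         for actual_col_idx in range(target_col_idx, n):
--             if is_col_viable(M2, swap_lists, target_col, actual_col_idx):
--                 update_M_with_viable_column(M2, swap_lists, target_col, target_col_idx, actual_col_idx)
--                 success = True
--                 break
--         if not success:
--             return False
--     return True
-- ===== Notes on version B (the rewrite author's own statement) =====
-- stated objective: idiomatic
-- what changed: find_swap_lists groups rows with one flat dict keyed by the row's k-prefix tuple (setdefault/append) instead of building and navigating a nested-dict trie column by column with leaf lists aliased into main_lists; the rest of the greedy algorithm is shared unchanged.
-- outside the precondition, e.g. on find_out_if_matrices_are_isomorphic([[5]], [[5]]): A returns True, B returns True; on find_out_if_matrices_are_isomorphic([[0, 0], [0, 0]], [[1, 0]]): A returns False, B returns False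
import Mathlib
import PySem

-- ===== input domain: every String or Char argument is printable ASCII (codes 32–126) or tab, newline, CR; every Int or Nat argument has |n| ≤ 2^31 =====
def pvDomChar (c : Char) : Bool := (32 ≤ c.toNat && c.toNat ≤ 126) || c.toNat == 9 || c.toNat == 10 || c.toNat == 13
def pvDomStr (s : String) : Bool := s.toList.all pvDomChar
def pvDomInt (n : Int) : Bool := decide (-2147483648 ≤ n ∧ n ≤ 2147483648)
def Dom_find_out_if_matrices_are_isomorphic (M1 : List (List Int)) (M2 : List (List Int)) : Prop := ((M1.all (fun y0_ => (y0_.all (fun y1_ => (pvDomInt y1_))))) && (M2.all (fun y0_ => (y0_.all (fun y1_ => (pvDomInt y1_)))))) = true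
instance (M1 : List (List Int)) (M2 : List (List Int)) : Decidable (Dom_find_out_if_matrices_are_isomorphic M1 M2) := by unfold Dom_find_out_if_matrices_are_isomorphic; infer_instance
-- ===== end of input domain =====

-- B rewrites only find_swap_lists: one flat dict keyed by the row's k-prefix instead of a
-- nested-dict trie navigated column by column (objective: idiomatic; same asymptotic cost).
-- Both Pythons mutate M2 in place (row/column swaps); the equivalence proved here is about
-- the return value (the Lean ports thread M2 as immutable state).

-- ===== PORT A =====
-- helpers shared verbatim by both Python files (Source B copies them unchanged from A):

-- [M[r][c] for r in range(0, len(M))]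
def get_copy_of_col (M : List (List Int)) (c : Int) : List Int :=
  (PySem.List.pyRange 0 (M.length : Int) 1).map
    (fun r => PySem.List.pyGetD (PySem.List.pyGetD M r []) c 0)

-- swap_rows(M, i, j): in-place triple assignment, modelled functionally (temp_row = old M[i])
def swap_rows (M : List (List Int)) (i j : Int) : List (List Int) :=
  PySem.List.pySetD (PySem.List.pySetD M i (PySem.List.pyGetD M j []))
    j (PySem.List.pyGetD M i [])

-- swap_cols(M, i, j): the per-row body 'temp=M[row][i]; M[row][i]=M[row][j]; M[row][j]=temp'
-- applied to each row index in order (exact: iterations touch distinct rows)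
def swap_cols (M : List (List Int)) (i j : Int) : List (List Int) :=
  M.map (fun row =>
    PySem.List.pySetD (PySem.List.pySetD row i (PySem.List.pyGetD row j 0))
      j (PySem.List.pyGetD row i 0))

-- Python 'wrong_counts[v]' / 'wrong_locs[v]' on a 2-element list: index v mod 2 is exact for
-- v ∈ {-2,-1,0,1} (negative-index wraparound); any other v raises IndexError (outside Pre_).
def pvBucket0 (v : Int) : Bool := PySem.Int.mod v 2 = 0

def is_col_viable (M : List (List Int)) (swap_lists : List (List Int))
    (target_col : List Int) (actual_col_idx : Int) : Bool :=
  let source_col := get_copy_of_col M actual_col_idx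
  swap_lists.all (fun sl =>
    let wc := (PySem.List.pyRange 0 (sl.length : Int) 1).foldl
      (fun (wc : Int × Int) row =>
        if PySem.List.pyGetD target_col row 0 ≠ PySem.List.pyGetD source_col row 0 then
          if pvBucket0 (PySem.List.pyGetD source_col row 0) then (wc.1 + 1, wc.2)
          else (wc.1, wc.2 + 1)
        else wc) (0, 0)
    wc.1 == wc.2)

def update_M_with_viable_column (M : List (List Int)) (swap_lists : List (List Int))
    (target_col : List Int) (target_col_idx actual_col_idx : Int) : List (List Int) :=
  let M' := swap_cols M target_col_idx actual_col_idx
  let source_col := get_copy_of_col M' target_col_idx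
  swap_lists.foldl (fun Macc sl =>
    let wl := (PySem.List.pyRange 0 (sl.length : Int) 1).foldl
      (fun (wl : List Int × List Int) row =>
        if PySem.List.pyGetD target_col row 0 ≠ PySem.List.pyGetD source_col row 0 then
          if pvBucket0 (PySem.List.pyGetD source_col row 0) then (wl.1 ++ [row], wl.2)
          else (wl.1, wl.2 ++ [row])
        else wl) ([], [])
    (PySem.List.pyRange 0 (wl.1.length : Int) 1).foldl
      (fun Mcur idx =>
        swap_rows Mcur (PySem.List.pyGetD wl.1 idx 0) (PySem.List.pyGetD wl.2 idx 0))
      Macc) M'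

-- A's nested-dict trie.  Python aliases the leaf lists into main_lists; we model that by
-- storing in each leaf the INDEX of its group in main_lists (append through the trie =
-- List.modify at that index).  A dict node is the spine mnil/mcons (key, entry, rest):
-- a single inductive, since nested/mutual inductives are not allowed here.
inductive PVTrie where
  | leaf : Nat → PVTrie       -- a leaf list, as its index into main_lists
  | mnil : PVTrie             -- empty dict node
  | mcons : Int → PVTrie → PVTrie → PVTrie   -- dict node cell: key, entry, rest of dict
deriving DecidableEq, Repr

-- dict lookup 'value in curr_dict' / 'curr_dict[value]' (first = unique match)
def pvMapFind? : PVTrie → Int → Option PVTrie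
  | .mcons k t m, v => if k = v then some t else pvMapFind? m v
  | _, _ => none

-- dict assignment 'curr_dict[value] = …' (overwrite in place; new key appends)
def pvMapSet : PVTrie → Int → PVTrie → PVTrie
  | .mcons k t0 m, v, t => if k = v then .mcons k t m else .mcons k t0 (pvMapSet m v t)
  | _, v, t => .mcons v t .mnil

-- A's inner 'for col in range(0, k)' navigation for one row; vals is the list of the values
-- M[row][col] read in column order (same reads, same order as A).
def pvTrieInsert : PVTrie → List Int → Int → List (List Int) →
    PVTrie × List (List Int)
  | m, [v], row, g =>
    (match pvMapFind? m v with
     | some (.leaf i) => (m, g.modify i (· ++ [row]))   -- curr_dict[value].append(row)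
     | some _ => (m, g)                                  -- unreachable (uniform depth)
     | none => (pvMapSet m v (.leaf g.length), g ++ [[row]]))  -- new leaf + main_lists.append
  | m, v :: w :: rest, row, g =>
    (match pvMapFind? m v with
     | some (.leaf _) => (m, g)                          -- unreachable (uniform depth)
     | some sub =>
        let p := pvTrieInsert sub (w :: rest) row g
        (pvMapSet m v p.1, p.2)                          -- curr_dict = curr_dict[value]
     | none =>
        let p := pvTrieInsert .mnil (w :: rest) row g    -- curr_dict[value] = {}
        (pvMapSet m v p.1, p.2))
  | m, [], _, g => (m, g)                                -- unreachable (k ≥ 1)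

def find_swap_lists (M : List (List Int)) (k : Int) : List (List Int) :=
  let n := M.length
  if k = 0 then [PySem.List.pyRange 0 (n : Int) 1]
  else
    ((PySem.List.pyRange 0 (n : Int) 1).foldl
      (fun (st : PVTrie × List (List Int)) row =>
        pvTrieInsert st.1
          ((PySem.List.pyRange 0 k 1).map
            (fun col => PySem.List.pyGetD (PySem.List.pyGetD M row []) col 0))
          row st.2)
      (.mnil, [])).2

-- inner 'for actual_col_idx in range(target_col_idx, n)' with break: first viable column
def pvInner : List Int → List (List Int) → List (List Int) → List Int →
    Int → Option (List (List Int))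
  | [], _, _, _, _ => none
  | a :: rest, M2, sls, tc, t =>
    if is_col_viable M2 sls tc a then some (update_M_with_viable_column M2 sls tc t a)
    else pvInner rest M2 sls tc t

-- outer 'for target_col_idx in range(0, n)' threading the mutated M2
def pvMainA (M1 : List (List Int)) : List Int → List (List Int) → Bool
  | [], _ => true
  | t :: ts, M2 =>
    let sls := find_swap_lists M2 t
    let tc := get_copy_of_col M1 t
    match pvInner (PySem.List.pyRange t (M1.length : Int) 1) M2 sls tc t with
    | none => false
    | some M2' => pvMainA M1 ts M2'

def find_out_if_matrices_are_isomorphic (M1 : List (List Int)) (M2 : List (List Int)) : Bool :=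
  pvMainA M1 (PySem.List.pyRange 0 (M1.length : Int) 1) M2

-- ===== PORT B =====
-- Source B: groups.setdefault(key, []).append(row) on a flat insertion-ordered dict
-- (hand-rolled assoc list: unique keys, first match, new keys append — exact dict model)
def pvSetdefaultAppend (d : List (List Int × List Int)) (key : List Int) (row : Int) :
    List (List Int × List Int) :=
  match d with
  | [] => [(key, [row])]
  | (k, g) :: rest =>
    if k = key then (k, g ++ [row]) :: rest else (k, g) :: pvSetdefaultAppend rest key row

def find_swap_lists_alt (M : List (List Int)) (k : Int) : List (List Int) :=
  let n := M.length
  if k = 0 then [PySem.List.pyRange 0 (n : Int) 1]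
  else
    ((PySem.List.pyRange 0 (n : Int) 1).foldl
      (fun (d : List (List Int × List Int)) row =>
        pvSetdefaultAppend d
          ((PySem.List.pyRange 0 k 1).map
            (fun col => PySem.List.pyGetD (PySem.List.pyGetD M row []) col 0))
          row)
      []).map Prod.snd   -- list(groups.values())

def pvMainB (M1 : List (List Int)) : List Int → List (List Int) → Bool
  | [], _ => true
  | t :: ts, M2 =>
    let sls := find_swap_lists_alt M2 t
    let tc := get_copy_of_col M1 t
    match pvInner (PySem.List.pyRange t (M1.length : Int) 1) M2 sls tc t with
    | none => false
    | some M2' => pvMainB M1 ts M2'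

def find_out_if_matrices_are_isomorphic_alt (M1 : List (List Int)) (M2 : List (List Int)) : Bool :=
  pvMainB M1 (PySem.List.pyRange 0 (M1.length : Int) 1) M2

-- ===== PRECONDITION & SPEC =====
-- Pre_: inputs on which Python A returns normally.  A indexes a 2-element list with matrix
-- values (IndexError outside {-2,-1,0,1}) and indexes rows/columns up to len(M1); Pre_ keeps
-- the square-shaped inputs with M2's used entries in that range (or M1 = [], where A returns
-- True immediately).  This is a closed-form under-approximation: on some excluded inputs the
-- offending access is never reached and A still returns (see claim cites); both programs
-- agree there too, Pre_ merely cannot express reachability in closed form.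
def Pre_find_out_if_matrices_are_isomorphic (M1 : List (List Int)) (M2 : List (List Int)) : Prop :=
  M1 = [] ∨
    (M2.length = M1.length ∧ (∀ r ∈ M1, M1.length ≤ r.length) ∧
     (∀ r ∈ M2, M1.length ≤ r.length) ∧
     (∀ r ∈ M2, ∀ v ∈ r.take M1.length, -2 ≤ v ∧ v ≤ 1))
instance (M1 : List (List Int)) (M2 : List (List Int)) :
    Decidable (Pre_find_out_if_matrices_are_isomorphic M1 M2) := by
  unfold Pre_find_out_if_matrices_are_isomorphic; infer_instance

def pvWitness_find_out_if_matrices_are_isomorphic : List (List Int) × List (List Int) :=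
  ([[0, 1], [1, 0]], [[1, 0], [0, 1]])

def Spec_find_out_if_matrices_are_isomorphic (M1 : List (List Int)) (M2 : List (List Int)) (out : Bool) : Prop := out = find_out_if_matrices_are_isomorphic_alt M1 M2
instance (M1 : List (List Int)) (M2 : List (List Int)) (out : Bool) : Decidable (Spec_find_out_if_matrices_are_isomorphic M1 M2 out) := by unfold Spec_find_out_if_matrices_are_isomorphic; infer_instance

-- ===== CLAIM (what is proved, stated in full; the proofs are below) =====
def Claim_equal_find_out_if_matrices_are_isomorphic : Prop := ∀ (M1 : List (List Int)) (M2 : List (List Int)), Dom_find_out_if_matrices_are_isomorphic M1 M2 → Pre_find_out_if_matrices_are_isomorphic M1 M2 → Spec_find_out_if_matrices_are_isomorphic M1 M2 (find_out_if_matrices_are_isomorphic M1 M2)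

-- ===== LEMMAS AND PROOFS =====

-- lookup of a full path in the trie: the group index stored at its leaf
def pvLookup : PVTrie → List Int → Option Nat
  | _, [] => none
  | m, [v] =>
    (match pvMapFind? m v with | some (.leaf i) => some i | _ => none)
  | m, v :: w :: rest =>
    (match pvMapFind? m v with
     | some (.leaf _) => none
     | some sub => pvLookup sub (w :: rest)
     | none => none)

-- well-formedness at remaining depth k: entries (pvWFE) are leaves iff k = 1,
-- dict spines (pvWFM) have well-formed entries
mutual
def pvWFE : PVTrie → Nat → Prop
  | .leaf _, k => k = 1
  | .mnil, k => 2 ≤ k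
  | .mcons _ t m, k => 2 ≤ k ∧ pvWFE t (k - 1) ∧ pvWFM m (k - 1)
def pvWFM : PVTrie → Nat → Prop
  | .mcons _ t m, k => pvWFE t k ∧ pvWFM m k
  | _, _ => True
end

-- an entry that is not a leaf is a dict well-formed one level down
lemma pvWFE_elim (t : PVTrie) (k : Nat) (h : pvWFE t k) (hl : ∀ i, t ≠ .leaf i) :
    2 ≤ k ∧ pvWFM t (k - 1) := by
  cases t with
  | leaf i => exact absurd rfl (hl i)
  | mnil => rw [pvWFE] at h; exact ⟨h, trivial⟩
  | mcons key t m => rw [pvWFE] at h; exact ⟨h.1, by rw [pvWFM]; exact ⟨h.2.1, h.2.2⟩⟩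

lemma pvWFE_intro (t : PVTrie) (k : Nat) (hk : 2 ≤ k) (h : pvWFM t (k - 1))
    (hl : ∀ i, t ≠ .leaf i) : pvWFE t k := by
  cases t with
  | leaf i => exact absurd rfl (hl i)
  | mnil => rw [pvWFE]; exact hk
  | mcons key t m => rw [pvWFM] at h; rw [pvWFE]; exact ⟨hk, h.1, h.2⟩

-- first index of a key among d's keys
def pvFindIdx : List (List Int × List Int) → List Int → Option Nat
  | [], _ => none
  | (k, _) :: rest, key =>
    if k = key then some 0 else (pvFindIdx rest key).map (· + 1)

lemma pvMapFind?_mapSet (m : PVTrie) (v : Int) (t : PVTrie) (v' : Int) :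
    pvMapFind? (pvMapSet m v t) v' = if v' = v then some t else pvMapFind? m v' := by
  induction m with
  | leaf i =>
    rcases eq_or_ne v' v with h | h
    · subst h; simp [pvMapSet, pvMapFind?]
    · simp [pvMapSet, pvMapFind?, h, Ne.symm h]
  | mnil =>
    rcases eq_or_ne v' v with h | h
    · subst h; simp [pvMapSet, pvMapFind?]
    · simp [pvMapSet, pvMapFind?, h, Ne.symm h]
  | mcons k t0 m iht ihm =>
    by_cases hk : k = v
    · subst hk
      by_cases hv : v' = k
      · subst hv; simp [pvMapSet, pvMapFind?]
      · simp [pvMapSet, pvMapFind?, hv, Ne.symm hv]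
    · by_cases hv : v' = k
      · subst hv; simp [pvMapSet, pvMapFind?, hk]
      · simp [pvMapSet, pvMapFind?, hk, Ne.symm hv, ihm]

lemma pvMapSet_self (m : PVTrie) (v : Int) (t : PVTrie)
    (h : pvMapFind? m v = some t) : pvMapSet m v t = m := by
  induction m with
  | leaf i => simp [pvMapFind?] at h
  | mnil => simp [pvMapFind?] at h
  | mcons k t0 m iht ihm =>
    by_cases hk : k = v
    · subst hk; simp [pvMapFind?] at h; simp [pvMapSet, h]
    · simp [pvMapFind?, hk] at h; simp [pvMapSet, hk, ihm h]

lemma pvWFE_of_find (m : PVTrie) (k : Nat) (v : Int) (t : PVTrie)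
    (hm : pvWFM m k) (h : pvMapFind? m v = some t) : pvWFE t k := by
  induction m with
  | leaf i => simp [pvMapFind?] at h
  | mnil => simp [pvMapFind?] at h
  | mcons key t0 m iht ihm =>
    rw [pvWFM] at hm
    by_cases hk : key = v
    · subst hk; simp [pvMapFind?] at h; subst h; exact hm.1
    · simp [pvMapFind?, hk] at h; exact ihm hm.2 h

lemma pvWFM_mapSet (m : PVTrie) (k : Nat) (v : Int) (t : PVTrie)
    (hm : pvWFM m k) (ht : pvWFE t k) : pvWFM (pvMapSet m v t) k := by
  induction m with
  | leaf i => simp [pvMapSet, pvWFM, ht]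
  | mnil => simp [pvMapSet, pvWFM, ht]
  | mcons key t0 m iht ihm =>
    rw [pvWFM] at hm
    by_cases hk : key = v
    · subst hk; rw [pvMapSet, if_pos rfl, pvWFM]; exact ⟨ht, hm.2⟩
    · rw [pvMapSet, if_neg hk, pvWFM]
      exact ⟨hm.1, ihm hm.2⟩

lemma pvLookup_mnil (path : List Int) : pvLookup .mnil path = none := by
  match path with
  | [] => rfl
  | [v] => simp [pvLookup, pvMapFind?]
  | v :: w :: rest => simp [pvLookup, pvMapFind?]

lemma pvMapSet_ne_leaf (m : PVTrie) (v : Int) (t : PVTrie) (i : Nat) :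
    pvMapSet m v t ≠ PVTrie.leaf i := by
  cases m with
  | leaf j => simp [pvMapSet]
  | mnil => simp [pvMapSet]
  | mcons k t0 m' => by_cases h : k = v <;> simp [pvMapSet, h]

lemma pvWFM_mnil (k : Nat) : pvWFM PVTrie.mnil k := by
  rw [pvWFM]
  · trivial
  · intro a b c h; cases h

lemma pvTrieInsert_cons_found (m sub : PVTrie) (v w : Int) (rest : List Int) (row : Int)
    (g : List (List Int)) (hf : pvMapFind? m v = some sub)
    (hnl : ∀ i, sub ≠ PVTrie.leaf i) :
    pvTrieInsert m (v :: w :: rest) row g =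
      (pvMapSet m v (pvTrieInsert sub (w :: rest) row g).1,
       (pvTrieInsert sub (w :: rest) row g).2) := by
  cases sub with
  | leaf i => exact absurd rfl (hnl i)
  | mnil => simp [pvTrieInsert, hf]
  | mcons k t0 m' => simp [pvTrieInsert, hf]

lemma pvTrieInsert_cons_none (m : PVTrie) (v w : Int) (rest : List Int) (row : Int)
    (g : List (List Int)) (hf : pvMapFind? m v = none) :
    pvTrieInsert m (v :: w :: rest) row g =
      (pvMapSet m v (pvTrieInsert .mnil (w :: rest) row g).1,
       (pvTrieInsert .mnil (w :: rest) row g).2) := by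
  simp [pvTrieInsert, hf]

lemma pvLookup_cons_found (m sub : PVTrie) (v w : Int) (rest : List Int)
    (hf : pvMapFind? m v = some sub) (hnl : ∀ i, sub ≠ PVTrie.leaf i) :
    pvLookup m (v :: w :: rest) = pvLookup sub (w :: rest) := by
  cases sub with
  | leaf i => exact absurd rfl (hnl i)
  | mnil => simp [pvLookup, hf]
  | mcons k t0 m' => simp [pvLookup, hf]

lemma pvLookup_cons_none (m : PVTrie) (v w : Int) (rest : List Int)
    (hf : pvMapFind? m v = none) : pvLookup m (v :: w :: rest) = none := by
  simp [pvLookup, hf]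

lemma pvLookup_cons_congr (m1 m2 : PVTrie) (v : Int) (tl : List Int)
    (h : pvMapFind? m1 v = pvMapFind? m2 v) :
    pvLookup m1 (v :: tl) = pvLookup m2 (v :: tl) := by
  cases tl with
  | nil => simp only [pvLookup, h]
  | cons w rest => simp only [pvLookup, h]

-- the behaviour of one trie insertion, phrased through pvLookup
lemma pvTrieInsert_spec (vals : List Int) (row : Int) :
    ∀ (m : PVTrie) (g : List (List Int)), vals ≠ [] → (∀ i, m ≠ PVTrie.leaf i) →
    pvWFM m vals.length →
    (∀ i, (pvTrieInsert m vals row g).1 ≠ PVTrie.leaf i) ∧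
    pvWFM (pvTrieInsert m vals row g).1 vals.length ∧
    ((∃ i, pvLookup m vals = some i ∧ (pvTrieInsert m vals row g).1 = m ∧
        (pvTrieInsert m vals row g).2 = g.modify i (· ++ [row])) ∨
     (pvLookup m vals = none ∧ (pvTrieInsert m vals row g).2 = g ++ [[row]] ∧
      ∀ path : List Int, path.length = vals.length →
        pvLookup (pvTrieInsert m vals row g).1 path =
          if path = vals then some g.length else pvLookup m path)) := by
  induction vals with
  | nil => intro m g hne _ _; exact absurd rfl hne
  | cons v tail ih =>
    intro m g _ hml hm
    cases tail with
    | nil =>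
      cases hf : pvMapFind? m v with
      | none =>
        have hred : pvTrieInsert m [v] row g = (pvMapSet m v (.leaf g.length), g ++ [[row]]) := by
          simp [pvTrieInsert, hf]
        rw [hred]
        refine ⟨fun i => pvMapSet_ne_leaf m v _ i, ?_, Or.inr ⟨?_, rfl, ?_⟩⟩
        · exact pvWFM_mapSet m _ v _ hm (by rw [pvWFE]; simp)
        · simp [pvLookup, hf]
        · intro path hlen
          cases path with
          | nil => simp at hlen
          | cons v' ptail =>
            cases ptail with
            | cons w' rest' => simp at hlen
            | nil =>
              by_cases hv : v' = v
              · subst hv; simp [pvLookup, pvMapFind?_mapSet]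
              · simp [pvLookup, pvMapFind?_mapSet, hv]
      | some t =>
        have hwe := pvWFE_of_find m _ v t hm hf
        cases t with
        | leaf i =>
          have hred : pvTrieInsert m [v] row g = (m, g.modify i (· ++ [row])) := by
            simp [pvTrieInsert, hf]
          rw [hred]
          refine ⟨hml, hm, Or.inl ⟨i, ?_, rfl, rfl⟩⟩
          simp [pvLookup, hf]
        | mnil => rw [pvWFE] at hwe; simp at hwe
        | mcons k t0 m' => rw [pvWFE] at hwe; simp at hwe
    | cons w rest =>
      have hlen2 : (v :: w :: rest).length = rest.length + 2 := by simp
      cases hf : pvMapFind? m v with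
      | some t =>
        have hwe := pvWFE_of_find m _ v t hm hf
        have hnl : ∀ i, t ≠ PVTrie.leaf i := by
          intro i he; subst he; rw [pvWFE] at hwe; simp at hwe
        obtain ⟨h2k, hsub⟩ := pvWFE_elim t _ hwe hnl
        have hsub' : pvWFM t (w :: rest).length := by
          have : (v :: w :: rest).length - 1 = (w :: rest).length := by simp
          rwa [this] at hsub
        obtain ⟨hpnl, hpwf, hdisj⟩ := ih t g (by simp) hnl hsub'
        rw [pvTrieInsert_cons_found m t v w rest row g hf hnl]
        have hfind' : ∀ v', pvMapFind? (pvMapSet m v (pvTrieInsert t (w :: rest) row g).1) v' =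
            if v' = v then some (pvTrieInsert t (w :: rest) row g).1 else pvMapFind? m v' :=
          fun v' => pvMapFind?_mapSet m v _ v'
        refine ⟨fun i => pvMapSet_ne_leaf m v _ i, ?_, ?_⟩
        · apply pvWFM_mapSet m _ v _ hm
          apply pvWFE_intro _ _ (by simp) ?_ hpnl
          have : (v :: w :: rest).length - 1 = (w :: rest).length := by simp
          rw [this]; exact hpwf
        · cases hdisj with
          | inl hfound =>
            obtain ⟨i, hlk, h1, h2⟩ := hfound
            left
            refine ⟨i, ?_, ?_, h2⟩
            · rw [pvLookup_cons_found m t v w rest hf hnl]; exact hlk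
            · rw [h1, pvMapSet_self m v t hf]
          | inr hnf =>
            obtain ⟨hlkn, hg, hpaths⟩ := hnf
            right
            refine ⟨?_, hg, ?_⟩
            · rw [pvLookup_cons_found m t v w rest hf hnl]; exact hlkn
            · intro path hlen
              cases path with
              | nil => simp at hlen
              | cons v' ptail =>
                cases ptail with
                | nil => simp at hlen
                | cons w' rest' =>
                  by_cases hv : v' = v
                  · subst hv
                    rw [pvLookup_cons_found _ _ v' w' rest'
                          (by rw [hfind' v']; simp) hpnl]
                    rw [hpaths (w' :: rest') (by simp at hlen ⊢; omega)]
                    rw [pvLookup_cons_found m t v' w' rest' hf hnl]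
                    by_cases hww : w' :: rest' = w :: rest <;> simp [hww]
                  · rw [pvLookup_cons_congr _ m v' (w' :: rest')
                          (by rw [hfind' v']; simp [hv])]
                    have : ¬ (v' :: w' :: rest' = v :: w :: rest) := by simp [hv]
                    simp [this]
      | none =>
        obtain ⟨hpnl, hpwf, hdisj⟩ :=
          ih PVTrie.mnil g (by simp) (by intro i h; cases h) (pvWFM_mnil _)
        rw [pvTrieInsert_cons_none m v w rest row g hf]
        have hfind' : ∀ v', pvMapFind? (pvMapSet m v (pvTrieInsert .mnil (w :: rest) row g).1) v' =
            if v' = v then some (pvTrieInsert .mnil (w :: rest) row g).1 else pvMapFind? m v' :=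
          fun v' => pvMapFind?_mapSet m v _ v'
        cases hdisj with
        | inl hfound =>
          obtain ⟨i, hlk, _, _⟩ := hfound
          rw [pvLookup_mnil] at hlk; cases hlk
        | inr hnf =>
          obtain ⟨_, hg, hpaths⟩ := hnf
          refine ⟨fun i => pvMapSet_ne_leaf m v _ i, ?_,
            Or.inr ⟨pvLookup_cons_none m v w rest hf, hg, ?_⟩⟩
          · apply pvWFM_mapSet m _ v _ hm
            apply pvWFE_intro _ _ (by simp) ?_ hpnl
            have : (v :: w :: rest).length - 1 = (w :: rest).length := by simp
            rw [this]; exact hpwf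
          · intro path hlen
            cases path with
            | nil => simp at hlen
            | cons v' ptail =>
              cases ptail with
              | nil => simp at hlen
              | cons w' rest' =>
                by_cases hv : v' = v
                · subst hv
                  rw [pvLookup_cons_found _ _ v' w' rest' (by rw [hfind' v']; simp) hpnl]
                  rw [hpaths (w' :: rest') (by simp at hlen ⊢; omega)]
                  rw [pvLookup_mnil, pvLookup_cons_none m v' w' rest' hf]
                  by_cases hww : w' :: rest' = w :: rest <;> simp [hww]
                · rw [pvLookup_cons_congr _ m v' (w' :: rest')
                        (by rw [hfind' v']; simp [hv])]
                  have : ¬ (v' :: w' :: rest' = v :: w :: rest) := by simp [hv]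
                  simp [this]

lemma pvSetdefaultAppend_found (d : List (List Int × List Int)) (key : List Int)
    (row : Int) :
    ∀ i, pvFindIdx d key = some i →
    (pvSetdefaultAppend d key row).map Prod.snd = (d.map Prod.snd).modify i (· ++ [row]) ∧
    ∀ path, pvFindIdx (pvSetdefaultAppend d key row) path = pvFindIdx d path := by
  induction d with
  | nil => intro i h; simp [pvFindIdx] at h
  | cons p rest ih =>
    obtain ⟨k0, g0⟩ := p
    intro i h
    by_cases hk : k0 = key
    · subst hk
      simp [pvFindIdx] at h
      subst h
      constructor
      · simp [pvSetdefaultAppend, List.modify]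
      · intro path
        by_cases hp : k0 = path <;> simp [pvSetdefaultAppend, pvFindIdx, hp]
    · simp [pvFindIdx, hk] at h
      obtain ⟨j, hj, rfl⟩ := h
      obtain ⟨ih1, ih2⟩ := ih j hj
      constructor
      · simp only [pvSetdefaultAppend, if_neg hk, List.map_cons, ih1, List.modify]
        rfl
      · intro path
        by_cases hp : k0 = path
        · have hpk : ¬ path = key := by rw [← hp]; exact hk
          simp [pvSetdefaultAppend, pvFindIdx, hp, hpk]
        · simp [pvSetdefaultAppend, pvFindIdx, hk, hp, ih2]

lemma pvSetdefaultAppend_notfound (d : List (List Int × List Int)) (key : List Int)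
    (row : Int) (h : pvFindIdx d key = none) :
    pvSetdefaultAppend d key row = d ++ [(key, [row])] := by
  induction d with
  | nil => simp [pvSetdefaultAppend]
  | cons p rest ih =>
    obtain ⟨k0, g0⟩ := p
    by_cases hk : k0 = key
    · subst hk; simp [pvFindIdx] at h
    · simp [pvFindIdx, hk] at h
      simp [pvSetdefaultAppend, hk, ih h]

lemma pvFindIdx_append (d : List (List Int × List Int)) (key path : List Int) (v : List Int)
    (h : pvFindIdx d key = none) :
    pvFindIdx (d ++ [(key, v)]) path =
      if path = key then some d.length else pvFindIdx d path := by
  induction d with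
  | nil =>
    by_cases hp : path = key
    · subst hp; simp [pvFindIdx]
    · have hkp : ¬ (key = path) := fun h' => hp h'.symm
      simp [pvFindIdx, hp, hkp]
  | cons p rest ih =>
    obtain ⟨k0, g0⟩ := p
    by_cases hk0 : k0 = key
    · subst hk0; simp [pvFindIdx] at h
    · simp [pvFindIdx, hk0] at h
      by_cases hp : k0 = path
      · subst hp
        have hpk : ¬ (k0 = key) := hk0
        simp [pvFindIdx, hpk]
      · simp [pvFindIdx, hp, ih h]
        by_cases he : path = key <;> simp [he]

-- the fold invariant tying A's (trie, main_lists) state to B's dict state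
def pvInv (m : PVTrie) (g : List (List Int)) (d : List (List Int × List Int))
    (k : Nat) : Prop :=
  (∀ i, m ≠ PVTrie.leaf i) ∧ pvWFM m k ∧ g = d.map Prod.snd ∧
  (∀ path : List Int, path.length = k → pvLookup m path = pvFindIdx d path)

lemma pvInv_step (m : PVTrie) (g : List (List Int)) (d : List (List Int × List Int))
    (k : Nat) (vals : List Int) (row : Int) (hk : vals.length = k) (hne : vals ≠ [])
    (h : pvInv m g d k) :
    pvInv (pvTrieInsert m vals row g).1 (pvTrieInsert m vals row g).2
      (pvSetdefaultAppend d vals row) k := by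
  obtain ⟨hml, hwf, hg, hlk⟩ := h
  subst hk
  obtain ⟨hnl', hwf', hdisj⟩ := pvTrieInsert_spec vals row m g hne hml hwf
  refine ⟨hnl', hwf', ?_, ?_⟩
  · cases hdisj with
    | inl hfound =>
      obtain ⟨i, hi, _, hg'⟩ := hfound
      have hfd : pvFindIdx d vals = some i := by rw [← hlk vals rfl]; exact hi
      obtain ⟨hmap, _⟩ := pvSetdefaultAppend_found d vals row i hfd
      rw [hg', hmap, hg]
    | inr hnf =>
      obtain ⟨hn, hg', _⟩ := hnf
      have hfd : pvFindIdx d vals = none := by rw [← hlk vals rfl]; exact hn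
      rw [hg', pvSetdefaultAppend_notfound d vals row hfd, hg]
      simp
  · intro path hlen
    cases hdisj with
    | inl hfound =>
      obtain ⟨i, hi, hm', _⟩ := hfound
      have hfd : pvFindIdx d vals = some i := by rw [← hlk vals rfl]; exact hi
      obtain ⟨_, hidx⟩ := pvSetdefaultAppend_found d vals row i hfd
      rw [hm', hidx path, hlk path hlen]
    | inr hnf =>
      obtain ⟨hn, _, hpaths⟩ := hnf
      have hfd : pvFindIdx d vals = none := by rw [← hlk vals rfl]; exact hn
      rw [pvSetdefaultAppend_notfound d vals row hfd,
          pvFindIdx_append d vals path _ hfd, hpaths path hlen]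
      by_cases hpv : path = vals
      · subst hpv; simp [hg]
      · simp [hpv, hlk path hlen]

lemma pvInv_fold (M : List (List Int)) (k : Int) (hk : 0 < k) (rows : List Int) :
    ∀ (m : PVTrie) (g : List (List Int)) (d : List (List Int × List Int)),
    pvInv m g d k.toNat →
    pvInv (rows.foldl (fun (st : PVTrie × List (List Int)) row =>
        pvTrieInsert st.1
          ((PySem.List.pyRange 0 k 1).map
            (fun col => PySem.List.pyGetD (PySem.List.pyGetD M row []) col 0)) row st.2)
        (m, g)).1
      (rows.foldl (fun (st : PVTrie × List (List Int)) row =>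
        pvTrieInsert st.1
          ((PySem.List.pyRange 0 k 1).map
            (fun col => PySem.List.pyGetD (PySem.List.pyGetD M row []) col 0)) row st.2)
        (m, g)).2
      (rows.foldl (fun (d : List (List Int × List Int)) row =>
        pvSetdefaultAppend d
          ((PySem.List.pyRange 0 k 1).map
            (fun col => PySem.List.pyGetD (PySem.List.pyGetD M row []) col 0)) row) d)
      k.toNat := by
  induction rows with
  | nil => intro m g d h; simpa using h
  | cons r rows ih =>
    intro m g d h
    simp only [List.foldl_cons]
    have hlenkey : ((PySem.List.pyRange 0 k 1).map
        (fun col => PySem.List.pyGetD (PySem.List.pyGetD M r []) col 0)).length = k.toNat := by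
      simp [PySem.List.length_pyRange_one]
    have hnekey : ((PySem.List.pyRange 0 k 1).map
        (fun col => PySem.List.pyGetD (PySem.List.pyGetD M r []) col 0)) ≠ [] := by
      intro hcon
      rw [← List.length_eq_zero_iff] at hcon
      omega
    exact ih _ _ _ (pvInv_step m g d k.toNat _ r hlenkey hnekey h)

lemma fsl_eq (M : List (List Int)) (k : Int) (hk : 0 ≤ k) :
    find_swap_lists M k = find_swap_lists_alt M k := by
  unfold find_swap_lists find_swap_lists_alt
  by_cases h0 : k = 0
  · simp [h0]
  · have hkpos : 0 < k := lt_of_le_of_ne hk (Ne.symm h0)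
    simp only [h0, if_false]
    have hinv0 : pvInv PVTrie.mnil [] [] k.toNat := by
      unfold pvInv
      refine ⟨?_, pvWFM_mnil _, by simp, fun path _ => ?_⟩
      · intro i h; exact PVTrie.noConfusion h
      · rw [pvLookup_mnil]; simp [pvFindIdx]
    exact (pvInv_fold M k hkpos (PySem.List.pyRange 0 (M.length : Int) 1)
      PVTrie.mnil [] [] hinv0).2.2.1

lemma pvMain_eq (M1 : List (List Int)) (ts : List Int) :
    ∀ M2, (∀ t ∈ ts, 0 ≤ t) → pvMainA M1 ts M2 = pvMainB M1 ts M2 := by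
  induction ts with
  | nil => intro M2 _; rfl
  | cons t ts ih =>
    intro M2 hts
    rw [pvMainA, pvMainB, fsl_eq M2 t (hts t (List.mem_cons_self ..))]
    cases pvInner (PySem.List.pyRange t (M1.length : Int) 1) M2
        (find_swap_lists_alt M2 t) (get_copy_of_col M1 t) t with
    | none => rfl
    | some M2' => exact ih M2' (fun x hx => hts x (List.mem_cons_of_mem _ hx))

-- ===== VERDICT (by name: the statement is the Claim_ definition above) =====
theorem find_out_if_matrices_are_isomorphic_spec : Claim_equal_find_out_if_matrices_are_isomorphic := by
  intro M1 M2 _ _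
  unfold Spec_find_out_if_matrices_are_isomorphic
  unfold find_out_if_matrices_are_isomorphic find_out_if_matrices_are_isomorphic_alt
  exact pvMain_eq M1 _ M2 (fun t ht => ((PySem.List.mem_pyRange_one).1 ht).1)
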